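-- pv_equiv track=rewrite | github.com/discus0434/prompt-battle-arena | src/battle_arena/pipeline_wrapper.py | _cleanup_prompt
-- ===== SOURCE A (Python) =====
-- def _cleanup_prompt(prompt: str) -> str:
--     prompt = prompt.strip()
--     while True:
--         if len(prompt) > 0 and prompt[-1] == ",":
--             prompt = prompt[:-1].strip()
--         else:
--             break
--     return prompt
-- ===== SOURCE B (Python) =====
-- def _cleanup_prompt(prompt: str) -> str:
--     s = prompt.strip()
--     i = len(s)
--     while i > 0 and (s[i - 1] == "," or s[i - 1].isspace()):
--         i -= 1
--     return s[:i]
-- ===== Notes on version B (the rewrite author's own statement) =====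
-- stated objective: alternative
-- what changed: Replaces A's repeated slice-and-re-strip while-loop with a single backward index scan over the stripped string that removes the trailing run of commas and whitespace in one pass; worst-case quadratic re-stripping disappears, though typical inputs measure the same.
import Mathlib
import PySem

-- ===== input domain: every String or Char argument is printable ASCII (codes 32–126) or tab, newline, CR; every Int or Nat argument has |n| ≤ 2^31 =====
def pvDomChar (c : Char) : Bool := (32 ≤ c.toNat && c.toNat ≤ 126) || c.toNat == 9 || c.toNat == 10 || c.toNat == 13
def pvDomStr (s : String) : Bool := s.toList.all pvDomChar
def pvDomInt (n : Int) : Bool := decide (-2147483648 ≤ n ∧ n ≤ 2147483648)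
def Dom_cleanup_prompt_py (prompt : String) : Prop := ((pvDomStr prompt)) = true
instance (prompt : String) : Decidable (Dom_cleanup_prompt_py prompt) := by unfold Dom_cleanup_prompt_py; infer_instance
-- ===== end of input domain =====

-- B replaces A's repeated slice-and-re-strip loop by one backward index scan over the
-- stripped string removing the trailing run of commas/whitespace (objective: alternative single-pass algorithm).

-- ===== PORT A =====
-- termination measure: length strictly drops (slice removes the last char, strip only shrinks)
theorem pvStripSliceLen (t : List Char) (h : 0 < t.length) :
    (PySem.Chars.strip (PySem.List.slice t none (some (-1)))).length < t.length := by
  have h1 : (PySem.List.slice t none (some (-1))) = t.dropLast := by simp [pysem]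
  have h2 : ∀ u : List Char, (PySem.Chars.strip u).length ≤ u.length := by
    intro u
    have := List.length_dropWhile_le PySem.Chars.isspace (PySem.Chars.lstrip u).reverse
    have := List.length_dropWhile_le PySem.Chars.isspace u
    simp [PySem.Chars.strip, PySem.Chars.rstrip, PySem.Chars.lstrip] at *
    omega
  have h3 : t.dropLast.length = t.length - 1 := by simp
  have := h2 t.dropLast
  rw [h1]
  omega

def pvALoop (t : List Char) : List Char :=
  if h : 0 < t.length ∧ PySem.List.pyGet? t (-1) = some ',' then
    pvALoop (PySem.Chars.strip (PySem.List.slice t none (some (-1))))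
  else t
termination_by t.length
decreasing_by exact pvStripSliceLen t h.1

def cleanup_prompt_py (prompt : String) : String :=
  String.ofList (pvALoop (PySem.Chars.strip prompt.toList))

-- ===== PORT B =====
def pvP (c : Char) : Bool := c == ',' || PySem.Chars.isspace c

def pvScan (s : List Char) : Nat → Nat
  | 0 => 0
  | Nat.succ j => if pvP (s.getD j ' ') then pvScan s j else j + 1

def cleanup_prompt_py_alt (prompt : String) : String :=
  let s := PySem.Chars.strip prompt.toList
  String.ofList (s.take (pvScan s s.length))

-- ===== PRECONDITION & SPEC =====
def Spec_cleanup_prompt_py (prompt : String) (out : String) : Prop := out = cleanup_prompt_py_alt prompt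
instance (prompt : String) (out : String) : Decidable (Spec_cleanup_prompt_py prompt out) := by unfold Spec_cleanup_prompt_py; infer_instance

-- ===== CLAIM (what is proved, stated in full; the proofs are below) =====
def Claim_equal_cleanup_prompt_py : Prop := ∀ (prompt : String), Dom_cleanup_prompt_py prompt → Spec_cleanup_prompt_py prompt (cleanup_prompt_py prompt)

-- ===== LEMMAS AND PROOFS =====

-- dropWhile by a weaker predicate first changes nothing
theorem pvDropWhile_subset (p q : Char → Bool) (hpq : ∀ c, q c = true → p c = true) :
    ∀ l : List Char, List.dropWhile p (List.dropWhile q l) = List.dropWhile p l := by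
  intro l
  induction l with
  | nil => simp
  | cons c l ih =>
    by_cases hq : q c = true
    · simp [hq, hpq c hq, ih]
    · simp [hq]

theorem pvRdropWhile_subset (p q : Char → Bool) (hpq : ∀ c, q c = true → p c = true)
    (l : List Char) :
    List.rdropWhile p (List.rdropWhile q l) = List.rdropWhile p l := by
  simp [List.rdropWhile, pvDropWhile_subset p q hpq]

-- a dropWhile fixed point passes to every prefix
theorem pvDropWhile_fixed_prefix (q : Char → Bool) :
    ∀ (u v : List Char), List.dropWhile q u = u → v <+: u → List.dropWhile q v = v := by
  intro u v hu hp
  cases v with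
  | nil => simp
  | cons c v' =>
    obtain ⟨w, rfl⟩ := hp
    simp only [List.cons_append, List.dropWhile_cons] at hu ⊢
    by_cases hq : q c = true
    · exfalso
      rw [if_pos hq] at hu
      have hlen := congrArg List.length hu
      have := List.length_dropWhile_le q (v' ++ w)
      simp [List.length_append] at hlen this
      omega
    · rw [if_neg hq]

-- lstrip/rstrip fixed points of a stripped string
theorem pvRstrip_eq_rdropWhile (u : List Char) :
    PySem.Chars.rstrip u = List.rdropWhile PySem.Chars.isspace u := rfl

theorem pvStrip_lstrip_fixed (s : List Char) :
    PySem.Chars.lstrip (PySem.Chars.strip s) = PySem.Chars.strip s := by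
  have h1 : PySem.Chars.lstrip (PySem.Chars.lstrip s) = PySem.Chars.lstrip s :=
    List.dropWhile_idempotent _ _
  exact pvDropWhile_fixed_prefix PySem.Chars.isspace (PySem.Chars.lstrip s) _ h1
    (by rw [PySem.Chars.strip, pvRstrip_eq_rdropWhile]; exact List.rdropWhile_prefix _ _)

theorem pvStrip_rstrip_fixed (s : List Char) :
    PySem.Chars.rstrip (PySem.Chars.strip s) = PySem.Chars.strip s := by
  rw [PySem.Chars.strip, pvRstrip_eq_rdropWhile, pvRstrip_eq_rdropWhile]
  exact List.rdropWhile_idempotent _ _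

theorem pvIsspace_imp_p (c : Char) (h : PySem.Chars.isspace c = true) : pvP c = true := by
  simp [pvP, h]

-- A's loop on a strip-fixed string computes rdropWhile pvP
theorem pvALoop_eq (t : List Char) (hl : PySem.Chars.lstrip t = t)
    (hr : PySem.Chars.rstrip t = t) : pvALoop t = List.rdropWhile pvP t := by
  rw [pvALoop]
  by_cases h : 0 < t.length ∧ PySem.List.pyGet? t (-1) = some ','
  · rw [dif_pos h]
    obtain ⟨hlen, hlast⟩ := h
    have htne : t ≠ [] := by cases t <;> simp_all
    have hslice : PySem.List.slice t none (some (-1)) = t.dropLast := by simp [pysem]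
    have hlast' : t.getLast? = some ',' := by
      rw [show PySem.List.pyGet? t (-1) = t.getLast? from by simp [pysem]] at hlast
      exact hlast
    -- the recursive argument is strip-fixed, so IH applies
    have ih := pvALoop_eq (PySem.Chars.strip (PySem.List.slice t none (some (-1))))
      (pvStrip_lstrip_fixed _) (pvStrip_rstrip_fixed _)
    rw [ih, hslice]
    -- lstrip (dropLast t) = dropLast t
    have hld : PySem.Chars.lstrip t.dropLast = t.dropLast :=
      pvDropWhile_fixed_prefix PySem.Chars.isspace t t.dropLast hl (List.dropLast_prefix t)
    rw [PySem.Chars.strip, hld, pvRstrip_eq_rdropWhile,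
        pvRdropWhile_subset pvP PySem.Chars.isspace pvIsspace_imp_p]
    -- rdropWhile pvP (dropLast t) = rdropWhile pvP t since last char is ','
    have hsplit : t.dropLast ++ [t.getLast htne] = t := List.dropLast_concat_getLast htne
    have hp : pvP (t.getLast htne) = true := by
      have : t.getLast htne = ',' := by
        rw [List.getLast?_eq_some_getLast htne] at hlast'
        exact Option.some.inj hlast'
      simp [this, pvP]
    calc List.rdropWhile pvP t.dropLast
        = List.rdropWhile pvP (t.dropLast ++ [t.getLast htne]) :=
          (List.rdropWhile_concat_pos pvP t.dropLast _ hp).symm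
      _ = List.rdropWhile pvP t := by rw [hsplit]
  · rw [dif_neg h]
    rcases Decidable.em (t = []) with rfl | htne
    · simp [List.rdropWhile]
    · -- last char: failed ',' test; not whitespace by hr; so rdropWhile keeps t
      symm
      rw [List.rdropWhile_eq_self_iff]
      intro _
      have hlast : t.getLast? = some (t.getLast htne) := List.getLast?_eq_some_getLast htne
      have hnot : t.getLast htne ≠ ',' := by
        intro hc
        apply h
        constructor
        · cases t <;> simp_all
        · rw [show PySem.List.pyGet? t (-1) = t.getLast? from by simp [pysem], hlast, hc]
      have hnsp : PySem.Chars.isspace (t.getLast htne) = false := by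
        by_contra hsp
        simp only [Bool.not_eq_false] at hsp
        -- then rstrip would shorten t
        have hr' : List.rdropWhile PySem.Chars.isspace t = t := by
          rw [← pvRstrip_eq_rdropWhile]; exact hr
        have hconcat := List.dropLast_concat_getLast htne
        have hstep : List.rdropWhile PySem.Chars.isspace t = List.rdropWhile PySem.Chars.isspace t.dropLast := by
          conv_lhs => rw [← hconcat]
          exact List.rdropWhile_concat_pos _ _ _ hsp
        have hlen1 := congrArg List.length hstep
        rw [hr'] at hlen1
        have hle : (List.rdropWhile PySem.Chars.isspace t.dropLast).length ≤ t.dropLast.length :=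
          (List.rdropWhile_prefix _ _).length_le
        have hdl : t.dropLast.length = t.length - 1 := by simp
        have : 0 < t.length := by cases t <;> simp_all
        omega
      simp [pvP, hnot, hnsp]
termination_by t.length
decreasing_by exact pvStripSliceLen t h.1

-- rdropWhile ignores an all-pvP suffix
theorem pvRdropWhile_append_all (l1 l2 : List Char) (h2 : ∀ c ∈ l2, pvP c = true) :
    List.rdropWhile pvP (l1 ++ l2) = List.rdropWhile pvP l1 := by
  rw [List.rdropWhile, List.rdropWhile, List.reverse_append, List.dropWhile_append]
  have : List.dropWhile pvP l2.reverse = [] := by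
    rw [List.dropWhile_eq_nil_iff]; intro x hx; exact h2 x (List.mem_reverse.mp hx)
  simp [this]

-- B's scan computes rdropWhile pvP (on the stripped string)
theorem pvScan_eq (s : List Char) (i : Nat) (hi : i ≤ s.length)
    (hall : ∀ c ∈ s.drop i, pvP c = true) :
    s.take (pvScan s i) = List.rdropWhile pvP s := by
  induction i with
  | zero =>
    simp only [pvScan, List.take_zero]
    symm
    rw [List.rdropWhile_eq_nil_iff]
    intro x hx
    exact hall x (by simpa using hx)
  | succ j ih =>
    have hj : j < s.length := hi
    have hget : s.getD j ' ' = s[j] := List.getD_eq_getElem s ' ' hj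
    rw [pvScan]
    by_cases hp : pvP (s.getD j ' ') = true
    · rw [if_pos hp]
      apply ih (Nat.le_of_lt hj)
      intro c hc
      rw [← List.getElem_cons_drop hj, List.mem_cons] at hc
      rcases hc with hc | hc
      · rw [hc, ← hget]; exact hp
      · exact hall c hc
    · rw [if_neg hp]
      have hsplit : s.take (j+1) ++ s.drop (j+1) = s := List.take_append_drop _ _
      have h1 : List.rdropWhile pvP s = List.rdropWhile pvP (s.take (j+1)) := by
        conv_lhs => rw [← hsplit]
        exact pvRdropWhile_append_all _ _ hall
      rw [h1]
      symm
      rw [List.rdropWhile_eq_self_iff]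
      intro hne
      have htl : (s.take (j+1)).length = j + 1 := by
        rw [List.length_take]; omega
      have : (s.take (j+1)).getLast hne = s[j] := by
        rw [List.getLast_eq_getElem]
        simp [htl]
      rw [this, ← hget]
      simpa using hp
    
-- ===== VERDICT (by name: the statement is the Claim_ definition above) =====
theorem cleanup_prompt_py_spec : Claim_equal_cleanup_prompt_py := by
  intro prompt _
  unfold Spec_cleanup_prompt_py cleanup_prompt_py cleanup_prompt_py_alt
  congr 1
  rw [pvALoop_eq _ (pvStrip_lstrip_fixed _) (pvStrip_rstrip_fixed _)]
  rw [pvScan_eq _ _ (le_refl _) (by simp)]
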